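-- pv_equiv track=rewrite | github.com/aegisceo/phone-osint-framework | scripts/data_models.py | extract_location_components
-- ===== SOURCE A (Python) =====
-- from typing import Dict, List, Optional
--
-- def extract_location_components(location_string: str) -> Dict:
--     """Extract city, state, country from location string"""
--     if not location_string:
--         return {}
--
--     components = [c.strip() for c in location_string.split(',')]
--
--     result = {'full': location_string}
--
--     if len(components) >= 3:
--         result['city'] = components[0]
--         result['state'] = components[1]
--         result['country'] = components[2]
--     elif len(components) == 2:
--         result['city'] = components[0]
--         result['state'] = components[1]
--     elif len(components) == 1:
--         result['city'] = components[0]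
--
--     return result
-- ===== SOURCE B (Python) =====
-- def extract_location_components(location_string: str) -> dict:
--     """Extract city, state, country from location string"""
--     if not location_string:
--         return {}
--     result = {'full': location_string}
--     start = 0
--     for key in ('city', 'state', 'country'):
--         end = location_string.find(',', start)
--         if end == -1:
--             result[key] = location_string[start:].strip()
--             return result
--         result[key] = location_string[start:end].strip()
--         start = end + 1
--     return result
-- ===== Notes on version B (the rewrite author's own statement) =====
-- stated objective: alternative
-- what changed: B never builds the split component list: it scans the string with a moving cursor via str.find of the separator, slicing and stripping at most three components directly and returning early at the last one, while A splits the whole string and strips every component first.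
import Mathlib
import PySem

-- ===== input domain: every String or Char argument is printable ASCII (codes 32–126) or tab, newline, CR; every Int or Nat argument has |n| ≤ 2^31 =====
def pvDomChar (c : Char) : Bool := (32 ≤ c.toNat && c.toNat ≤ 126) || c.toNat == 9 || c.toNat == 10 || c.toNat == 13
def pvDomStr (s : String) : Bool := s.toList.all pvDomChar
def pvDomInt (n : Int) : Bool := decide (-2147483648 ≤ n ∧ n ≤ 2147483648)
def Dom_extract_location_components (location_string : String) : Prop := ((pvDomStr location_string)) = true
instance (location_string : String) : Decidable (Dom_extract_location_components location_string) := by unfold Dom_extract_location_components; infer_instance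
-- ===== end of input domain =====

-- B replaces A's split-then-branch construction by a find(',')-cursor scan that slices and
-- strips at most three components directly, returning early at the last one (alternative algorithm, same cost).

-- ===== PORT A =====
def extract_location_components (location_string : String) : List (String × String) :=
  if location_string = "" then [] else
  let components := (PySem.Chars.splitOn location_string.toList ",".toList).map
      (fun c => String.ofList (PySem.Chars.strip c))
  let result : PySem.Dict String String := PySem.Dict.empty.insert "full" location_string
  let result :=
    if components.length ≥ 3 then
      ((result.insert "city" (components.getD 0 "")).insert "state" (components.getD 1 "")).insert "country" (components.getD 2 "")
    else if components.length = 2 then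
      (result.insert "city" (components.getD 0 "")).insert "state" (components.getD 1 "")
    else if components.length = 1 then
      result.insert "city" (components.getD 0 "")
    else result
  result.items

-- ===== PORT B =====
-- the 'for key in (…)' loop with its early return, as structural recursion over the key tuple
def extractLocGoB (s : List Char) (keys : List String) (start : Int)
    (result : PySem.Dict String String) : PySem.Dict String String :=
  match keys with
  | [] => result
  | key :: ks =>
    let e := PySem.Chars.findFrom s [','] start
    if e = -1 then
      result.insert key (String.ofList (PySem.Chars.strip (PySem.Chars.slice s (some start) none)))
    else
      extractLocGoB s ks (e + 1)
        (result.insert key (String.ofList (PySem.Chars.strip (PySem.Chars.slice s (some start) (some e)))))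

def extract_location_components_alt (location_string : String) : List (String × String) :=
  if location_string = "" then [] else
  (extractLocGoB location_string.toList ["city", "state", "country"] 0
    (PySem.Dict.empty.insert "full" location_string)).items

-- ===== PRECONDITION & SPEC =====
def Spec_extract_location_components (location_string : String) (out : List (String × String)) : Prop := out = extract_location_components_alt location_string
instance (location_string : String) (out : List (String × String)) : Decidable (Spec_extract_location_components location_string out) := by unfold Spec_extract_location_components; infer_instance

-- ===== CLAIM (what is proved, stated in full; the proofs are below) =====
def Claim_equal_extract_location_components : Prop := ∀ (location_string : String), Dom_extract_location_components location_string → Spec_extract_location_components location_string (extract_location_components location_string)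

-- ===== LEMMAS AND PROOFS =====

-- comma-split of a character list, as a structural peel (proof-side characterisation of both ports)
def spComma (l : List Char) : List (List Char) :=
  if h : (',' : Char) ∈ l then
    l.take (l.idxOf ',') :: spComma (l.drop (l.idxOf ',' + 1))
  else [l]
termination_by l.length
decreasing_by
  have h1 : l.idxOf ',' < l.length := List.idxOf_lt_length_of_mem h
  simp only [List.length_drop]; omega

lemma spComma_ne_nil (l : List Char) : spComma l ≠ [] := by
  unfold spComma; split <;> simp

lemma find_go_comma (l : List Char) (k : Nat) :
    PySem.Chars.find.go [','] l k =
      if (',' : Char) ∈ l then ((k : Int) + l.idxOf ',') else -1 := by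
  induction l generalizing k with
  | nil => simp [PySem.Chars.find.go]
  | cons c t ih =>
    by_cases hc : c = ','
    · subst hc; simp [PySem.Chars.find.go, List.isPrefixOf]
    · have : ¬ ([','].isPrefixOf (c :: t) = true) := by
        simp [List.isPrefixOf]; exact fun h => absurd h.symm hc
      simp only [PySem.Chars.find.go, if_neg this, ih (k + 1), List.mem_cons]
      by_cases hm : (',' : Char) ∈ t
      · simp [hm, Ne.symm hc, hc]
        ring
      · simp [hm, Ne.symm hc]

lemma find_comma (l : List Char) :
    PySem.Chars.find l [','] = if (',' : Char) ∈ l then (l.idxOf ',' : Int) else -1 := by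
  simpa using find_go_comma l 0

-- prepend to the first block of a split
def consFirst (p : List Char) : List (List Char) → List (List Char)
  | [] => [p]
  | x :: xs => (p ++ x) :: xs

lemma splitOn_go_comma (fuel : Nat) :
    ∀ (l cur : List Char) (acc : List (List Char)), l.length < fuel →
      PySem.Chars.splitOn.go [','] fuel l cur acc =
        acc.reverse ++ consFirst cur.reverse (spComma l) := by
  induction fuel with
  | zero => intro l cur acc h; omega
  | succ fuel ih =>
    intro l cur acc h
    match l with
    | [] =>
      simp [PySem.Chars.splitOn.go, spComma, consFirst]
    | c :: rest =>
      by_cases hc : c = ','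
      · subst hc
        have hpre : ([','].isPrefixOf (',' :: rest)) = true := by simp [List.isPrefixOf]
        have hlen : rest.length < fuel := by simp at h; omega
        simp only [PySem.Chars.splitOn.go, hpre, if_pos, List.length_cons, List.length_nil,
          List.drop_succ_cons, List.drop_zero]
        rw [ih rest [] (cur.reverse :: acc) hlen]
        have hsp : spComma (',' :: rest) = [] :: spComma rest := by
          rw [spComma]; simp
        rw [hsp]
        rcases hr : spComma rest with _ | ⟨x, xs⟩
        · exact absurd hr (spComma_ne_nil rest)
        · simp [consFirst]
      · have hpre : ¬ (([','].isPrefixOf (c :: rest)) = true) := by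
          simp [List.isPrefixOf]; exact fun h => absurd h.symm hc
        have hlen : rest.length < fuel := by simp at h; omega
        simp only [PySem.Chars.splitOn.go, hpre]
        rw [ih rest (c :: cur) acc hlen]
        by_cases hm : (',' : Char) ∈ rest
        · have hsp : spComma (c :: rest) =
              (c :: rest.take (rest.idxOf ',')) :: spComma (rest.drop (rest.idxOf ',' + 1)) := by
            rw [spComma]
            simp [List.mem_cons, hm, Ne.symm hc, hc]
          rw [hsp]
          have hsp' : spComma rest =
              rest.take (rest.idxOf ',') :: spComma (rest.drop (rest.idxOf ',' + 1)) := by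
            rw [spComma]; simp [hm]
          
          rw [hsp']
          simp [consFirst]
        · have hnm : (',' : Char) ∉ c :: rest := by
            simp only [List.mem_cons]; rintro (h | h)
            · exact hc h.symm
            · exact hm h
          have hsp : spComma (c :: rest) = [c :: rest] := by
            rw [spComma]; simp [hnm]
          have hsp' : spComma rest = [rest] := by rw [spComma]; simp [hm]
          rw [hsp, hsp']
          simp [consFirst]

lemma splitOn_comma (l : List Char) :
    PySem.Chars.splitOn l [','] = spComma l := by
  unfold PySem.Chars.splitOn
  rw [splitOn_go_comma (l.length + 1) l [] [] (by omega)]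
  rcases hr : spComma l with _ | ⟨x, xs⟩
  · exact absurd hr (spComma_ne_nil l)
  · simp [consFirst]

-- the zip-style assignment both ports reduce to
def assignKeys (keys comps : List String) (d : PySem.Dict String String) :
    PySem.Dict String String :=
  (keys.zip comps).foldl (fun d kv => d.insert kv.1 kv.2) d

lemma elcGo_eq_assign (s : List Char) (keys : List String) (k : Nat) (hk : k ≤ s.length)
    (d : PySem.Dict String String) :
    extractLocGoB s keys (k : Int) d =
      assignKeys keys ((spComma (s.drop k)).map (fun c => String.ofList (PySem.Chars.strip c))) d := by
  induction keys generalizing k d with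
  | nil => simp [extractLocGoB, assignKeys]
  | cons key ks ih =>
    have hff : PySem.Chars.findFrom s [','] (k : Int) none =
        if PySem.Chars.find (s.drop k) [','] = -1 then -1
        else (k : Int) + PySem.Chars.find (s.drop k) [','] :=
      PySem.Chars.findFrom_natCast s [','] k hk
    by_cases hm : (',' : Char) ∈ s.drop k
    · obtain ⟨i, hi⟩ : ∃ i, (s.drop k).idxOf ',' = i := ⟨_, rfl⟩
      have hilt : i < (s.drop k).length := hi ▸ List.idxOf_lt_length_of_mem hm
      have hfe : PySem.Chars.findFrom s [','] (k : Int) none = (k : Int) + (i : Int) := by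
        rw [hff, find_comma, if_pos hm, hi]
        have hne' : ¬ ((i : Int) = -1) := by omega
        rw [if_neg hne']
      have hne : ¬ ((k : Int) + (i : Int) = -1) := by omega
      have hslice : PySem.List.slice s (some (k : Int)) (some ((k : Int) + (i : Int))) =
          (s.drop k).take i := PySem.List.slice_natCast_add s k i
      have hsp : spComma (s.drop k) =
          (s.drop k).take i :: spComma ((s.drop k).drop (i + 1)) := by
        rw [spComma]; simp [hm, hi]
      have hdd : (s.drop k).drop (i + 1) = s.drop (k + i + 1) := by
        rw [List.drop_drop]; ring_nf
      have hk' : k + i + 1 ≤ s.length := by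
        simp only [List.length_drop] at hilt; omega
      have hcast : PySem.Chars.findFrom s [','] (k : Int) none + 1 = ((k + i + 1 : Nat) : Int) := by
        rw [hfe]; push_cast; ring
      rw [extractLocGoB]
      simp only [hfe, if_neg hne] at *
      rw [show ((k : Int) + (i : Int) + 1) = ((k + i + 1 : Nat) : Int) by push_cast; ring]
      rw [ih (k + i + 1) hk']
      rw [hsp, hdd]
      simp only [PySem.Chars.slice_eq_listSlice, hslice]
      simp [assignKeys]
    · have hfe : PySem.Chars.findFrom s [','] (k : Int) none = -1 := by
        rw [hff, find_comma, if_neg hm]; simp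
      have hsp : spComma (s.drop k) = [s.drop k] := by rw [spComma]; simp [hm]
      rw [extractLocGoB]
      simp only [hfe, if_pos]
      rw [hsp]
      have hslice : PySem.List.slice s (some (k : Int)) none = s.drop k :=
        PySem.List.slice_from_natCast s k
      simp [assignKeys, PySem.Chars.slice_eq_listSlice, hslice]

lemma branch_eq_assign (comps : List String) (d : PySem.Dict String String) :
    (if comps.length ≥ 3 then
      ((d.insert "city" (comps.getD 0 "")).insert "state" (comps.getD 1 "")).insert "country" (comps.getD 2 "")
    else if comps.length = 2 then
      (d.insert "city" (comps.getD 0 "")).insert "state" (comps.getD 1 "")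
    else if comps.length = 1 then
      d.insert "city" (comps.getD 0 "")
    else d) = assignKeys ["city", "state", "country"] comps d := by
  rcases comps with _ | ⟨a, _ | ⟨b, _ | ⟨c, r⟩⟩⟩ <;>
    simp [assignKeys]

-- ===== VERDICT (by name: the statement is the Claim_ definition above) =====
theorem extract_location_components_spec : Claim_equal_extract_location_components := by
  intro s _
  unfold Spec_extract_location_components
  by_cases h : s = ""
  · simp [extract_location_components, extract_location_components_alt, h]
  · have hcomma : (",".toList) = [','] := rfl
    simp only [extract_location_components, extract_location_components_alt, if_neg h, hcomma]
    rw [splitOn_comma, branch_eq_assign]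
    have := elcGo_eq_assign s.toList ["city", "state", "country"] 0 (by omega)
      (PySem.Dict.empty.insert "full" s)
    simp only [Nat.cast_zero, List.drop_zero] at this
    rw [this]
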